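-- pv_equiv track=rewrite | github.com/hanshaunlee/anchor | apps/api/api/pipeline.py | _sessions_from_events
-- ===== SOURCE A (Python) =====
-- def _sessions_from_events(ingested_events: list[dict]) -> list[dict]:
--     """Build session list for graph: one entry per session_id with started_at = min(ts) in that session."""
--     by_sid: dict[str, list] = {}
--     for ev in ingested_events or []:
--         sid = ev.get("session_id") or ""
--         if sid not in by_sid:
--             by_sid[sid] = []
--         by_sid[sid].append(ev.get("ts"))
--     sessions = []
--     for sid, ts_list in by_sid.items():
--         if not sid:
--             continue
--         valid_ts = [t for t in ts_list if t is not None]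
--         started_at = min(valid_ts) if valid_ts else None
--         sessions.append({"id": sid, "started_at": started_at})
--     return sessions
-- ===== SOURCE B (Python) =====
-- def _sessions_from_events(ingested_events: list[dict]) -> list[dict]:
--     """One streaming pass: keep a running minimum ts per non-empty session_id."""
--     mins: dict[str, object] = {}
--     for ev in ingested_events or []:
--         sid = ev.get("session_id") or ""
--         if not sid:
--             continue
--         ts = ev.get("ts")
--         if sid not in mins:
--             mins[sid] = ts
--         elif ts is not None and (mins[sid] is None or ts < mins[sid]):
--             mins[sid] = ts
--     return [{"id": sid, "started_at": m} for sid, m in mins.items()]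
-- ===== Notes on version B (the rewrite author's own statement) =====
-- stated objective: simpler
-- what changed: Replaces A's two-phase group-then-reduce (dict of per-session timestamp lists, then a filter+min pass over each list) with a single streaming pass that skips empty session ids up front and keeps one running minimum timestamp per session, emitting the result by a plain map over the dict.
import Mathlib
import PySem

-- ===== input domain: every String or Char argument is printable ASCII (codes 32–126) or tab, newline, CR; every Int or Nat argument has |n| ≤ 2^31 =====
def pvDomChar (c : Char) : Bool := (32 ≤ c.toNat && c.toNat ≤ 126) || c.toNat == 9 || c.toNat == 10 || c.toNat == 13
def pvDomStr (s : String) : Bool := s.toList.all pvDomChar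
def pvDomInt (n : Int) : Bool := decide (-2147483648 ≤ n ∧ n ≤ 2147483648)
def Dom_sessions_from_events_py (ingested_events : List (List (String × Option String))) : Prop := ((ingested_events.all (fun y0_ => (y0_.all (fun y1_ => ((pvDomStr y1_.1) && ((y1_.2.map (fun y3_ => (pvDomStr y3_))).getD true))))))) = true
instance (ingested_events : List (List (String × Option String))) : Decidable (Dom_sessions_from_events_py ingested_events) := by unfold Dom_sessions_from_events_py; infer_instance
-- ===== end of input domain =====

-- B replaces A's group-into-lists-then-reduce with a single streaming pass keeping a running
-- minimum timestamp per non-empty session id (simpler: no intermediate timestamp lists, one loop).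

-- ===== PORT A =====
-- ev.get(key): first-match lookup in the event dict, None when absent (value may itself be None)
def pvEvGet (ev : List (String × Option String)) (k : String) : Option String :=
  ((PySem.Dict.mk ev).get? k).getD none

-- body of A's first loop: sid = ev.get("session_id") or ""; ensure key; by_sid[sid].append(ev.get("ts"))
def sessionsA_step (d : PySem.Dict String (List (Option String)))
    (ev : List (String × Option String)) : PySem.Dict String (List (Option String)) :=
  let sid := (pvEvGet ev "session_id").getD ""
  let d := if d.contains sid then d else d.insert sid []
  d.modify sid [] (fun l => l ++ [pvEvGet ev "ts"])

def sessions_from_events_py (ingested_events : List (List (String × Option String))) :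
    List (List (String × Option String)) :=
  let by_sid := ingested_events.foldl sessionsA_step PySem.Dict.empty
  by_sid.items.foldl (fun sessions p =>
    if p.1 == "" then sessions
    else
      let valid_ts := p.2.filterMap (fun t => t)
      let started_at := if valid_ts = [] then none
                        else PySem.List.min? valid_ts (fun x => x)
      sessions ++ [[("id", some p.1), ("started_at", started_at)]]) []

-- ===== PORT B =====
-- body of B's single loop: skip empty sid, otherwise fold the event's ts into the running minimum
def sessionsB_step (d : PySem.Dict String (Option String))
    (ev : List (String × Option String)) : PySem.Dict String (Option String) :=
  let sid := (pvEvGet ev "session_id").getD ""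
  if sid == "" then d
  else
    let ts := pvEvGet ev "ts"
    if d.contains sid = false then d.insert sid ts
    else
      match ts, d.getD sid none with
      | none, _ => d
      | some t, none => d.insert sid (some t)
      | some t, some m => if t < m then d.insert sid (some t) else d

def sessions_from_events_py_alt (ingested_events : List (List (String × Option String))) :
    List (List (String × Option String)) :=
  let mins := ingested_events.foldl sessionsB_step PySem.Dict.empty
  mins.items.map (fun p => [("id", some p.1), ("started_at", p.2)])

-- ===== PRECONDITION & SPEC =====
def Spec_sessions_from_events_py (ingested_events : List (List (String × Option String))) (out : List (List (String × Option String))) : Prop := out = sessions_from_events_py_alt ingested_events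
instance (ingested_events : List (List (String × Option String))) (out : List (List (String × Option String))) : Decidable (Spec_sessions_from_events_py ingested_events out) := by unfold Spec_sessions_from_events_py; infer_instance

-- ===== CLAIM (what is proved, stated in full; the proofs are below) =====
def Claim_equal_sessions_from_events_py : Prop := ∀ (ingested_events : List (List (String × Option String))), Dom_sessions_from_events_py ingested_events → Spec_sessions_from_events_py ingested_events (sessions_from_events_py ingested_events)

-- ===== LEMMAS AND PROOFS =====

-- the value B maintains for a session: the minimum of the non-None timestamps A collects
def mval (l : List (Option String)) : Option String :=
  PySem.List.min? (l.filterMap (fun t => t)) (fun x => x)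

theorem mval_append_none (l : List (Option String)) : mval (l ++ [none]) = mval l := by
  simp [mval]

theorem if_lt_eq_min (t m : String) : (if t < m then t else m) = min m t := by
  rcases lt_trichotomy t m with h | h | h
  · rw [if_pos h, min_eq_right (le_of_lt h)]
  · subst h; simp
  · rw [if_neg (not_lt.2 (le_of_lt h)), min_eq_left (le_of_lt h)]

theorem mval_append_some (l : List (Option String)) (t : String) :
    mval (l ++ [some t]) =
      match mval l with
      | none => some t
      | some m => some (if t < m then t else m) := by
  unfold mval
  rw [List.filterMap_append]
  cases h : l.filterMap (fun t => t) with
  | nil =>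
      have h0 : (PySem.List.min? ([] : List String) (fun x => x)) = none :=
        (PySem.List.min?_eq_none_iff [] _).2 rfl
      simp [h0, PySem.List.min?_id_cons]
  | cons x r =>
      have hft : List.filterMap (fun t : Option String => t) [some t] = [t] := by simp
      rw [hft, List.cons_append, PySem.List.min?_id_cons, PySem.List.min?_id_cons,
        List.foldl_append]
      simp only [List.foldl_cons, List.foldl_nil]
      exact congrArg some (if_lt_eq_min t (List.foldl min x r)).symm

theorem mval_single (o : Option String) : mval [o] = o := by
  cases o with
  | none => simp [mval]
  | some t => simp [mval, PySem.List.min?_id_cons]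

-- one event preserves the simulation between A's dict of timestamp lists and B's dict of minima
theorem step_inv (dA : PySem.Dict String (List (Option String)))
    (dB : PySem.Dict String (Option String)) (ev : List (String × Option String))
    (hnd : dA.keys.Nodup)
    (hkeys : dB.keys = dA.keys.filter (fun k => !(k == "")))
    (hval : ∀ k : String, k ≠ "" → dB.getD k none = mval (dA.getD k [])) :
    (sessionsA_step dA ev).keys.Nodup ∧
    (sessionsB_step dB ev).keys = (sessionsA_step dA ev).keys.filter (fun k => !(k == "")) ∧
    (∀ k : String, k ≠ "" →
      (sessionsB_step dB ev).getD k none = mval ((sessionsA_step dA ev).getD k [])) := by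
  simp only [sessionsA_step, sessionsB_step]
  generalize (pvEvGet ev "session_id").getD "" = sid
  generalize pvEvGet ev "ts" = ts
  by_cases hse : sid = ""
  · subst hse
    rw [if_pos (show ((("" : String) == "") = true) by simp)]
    by_cases hA : dA.contains "" = true
    · rw [if_pos hA]
      have hkmod : (dA.modify "" [] (fun l => l ++ [ts])).keys = dA.keys := by
        rw [PySem.Dict.keys_modify, PySem.Dict.keys_insert_of_contains dA _ hA]
      refine ⟨by rw [hkmod]; exact hnd, by rw [hkmod]; exact hkeys, ?_⟩
      intro k hk
      rw [PySem.Dict.getD_modify, if_neg hk]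
      exact hval k hk
    · rw [if_neg hA]
      have hA' : dA.contains "" = false := by
        cases h : dA.contains "" with
        | true => exact absurd h hA
        | false => rfl
      have hAm : ¬ ("" : String) ∈ dA.keys := fun h =>
        hA ((PySem.Dict.contains_iff_mem_keys dA "").2 h)
      have hc1 : (dA.insert "" ([] : List (Option String))).contains "" = true :=
        PySem.Dict.contains_insert_self dA "" []
      have hkA' : ((dA.insert "" ([] : List (Option String))).modify "" []
          (fun l => l ++ [ts])).keys = dA.keys ++ [""] := by
        rw [PySem.Dict.keys_modify, PySem.Dict.keys_insert_of_contains _ _ hc1,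
          PySem.Dict.keys_insert_of_not_contains dA _ hA']
      refine ⟨?_, ?_, ?_⟩
      · rw [hkA']
        refine List.Nodup.append hnd (List.nodup_singleton _) ?_
        intro a ha hb
        rw [List.mem_singleton] at hb
        exact hAm (hb ▸ ha)
      · rw [hkA', List.filter_append]
        simpa using hkeys
      · intro k hk
        rw [PySem.Dict.getD_modify, if_neg hk, PySem.Dict.getD_insert, if_neg hk]
        exact hval k hk
  · rw [if_neg (show ¬ ((sid == "") = true) by simp [hse])]
    have hmem : (sid ∈ dB.keys) ↔ (sid ∈ dA.keys) := by
      rw [hkeys, List.mem_filter]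
      simp [hse]
    by_cases hA : dA.contains sid = true
    · -- sid already a key of both dicts
      have hB : dB.contains sid = true :=
        (PySem.Dict.contains_iff_mem_keys dB sid).2
          (hmem.2 ((PySem.Dict.contains_iff_mem_keys dA sid).1 hA))
      rw [if_pos hA, if_neg (show ¬ (dB.contains sid = false) by simp [hB])]
      have hkmod : (dA.modify sid [] (fun l => l ++ [ts])).keys = dA.keys := by
        rw [PySem.Dict.keys_modify, PySem.Dict.keys_insert_of_contains dA _ hA]
      have hki : ∀ v, (dB.insert sid v).keys = dB.keys :=
        fun v => PySem.Dict.keys_insert_of_contains dB v hB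
      have hgi : ∀ (v : Option String) (k : String), k ≠ sid →
          (dB.insert sid v).getD k none = dB.getD k none := by
        intro v k hks
        rw [PySem.Dict.getD_insert, if_neg hks]
      refine ⟨by rw [hkmod]; exact hnd, ?_, ?_⟩
      · rw [hkmod]
        split
        · exact hkeys
        · rw [hki]; exact hkeys
        · split
          · rw [hki]; exact hkeys
          · exact hkeys
      · intro k hk
        rw [PySem.Dict.getD_modify]
        by_cases hks : k = sid
        · subst hks
          rw [if_pos rfl]
          have hvk := hval k hse
          split
          · rw [mval_append_none]
            exact hvk
          · rename_i t heq
            rw [PySem.Dict.getD_insert, if_pos rfl, mval_append_some, ← hvk, heq]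
          · rename_i t m heq
            rw [mval_append_some, ← hvk, heq]
            split
            · rename_i hlt
              simp [hlt]
            · rename_i hlt
              rw [heq]
              simp [hlt]
        · rw [if_neg hks]
          split
          · exact hval k hk
          · rw [hgi _ _ hks]; exact hval k hk
          · split
            · rw [hgi _ _ hks]; exact hval k hk
            · exact hval k hk
    · -- sid is a fresh key: both dicts append it at the end
      have hA' : dA.contains sid = false := by
        cases h : dA.contains sid with
        | true => exact absurd h hA
        | false => rfl
      have hAm : ¬ sid ∈ dA.keys := fun h =>
        hA ((PySem.Dict.contains_iff_mem_keys dA sid).2 h)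
      have hB' : dB.contains sid = false := by
        cases h : dB.contains sid with
        | true => exact absurd ((PySem.Dict.contains_iff_mem_keys dB sid).1 h) (fun hm => hAm (hmem.1 hm))
        | false => rfl
      rw [if_neg hA, if_pos hB']
      have hc1 : (dA.insert sid ([] : List (Option String))).contains sid = true :=
        PySem.Dict.contains_insert_self dA sid []
      have hkA' : ((dA.insert sid ([] : List (Option String))).modify sid []
          (fun l => l ++ [ts])).keys = dA.keys ++ [sid] := by
        rw [PySem.Dict.keys_modify, PySem.Dict.keys_insert_of_contains _ _ hc1,
          PySem.Dict.keys_insert_of_not_contains dA _ hA']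
      refine ⟨?_, ?_, ?_⟩
      · rw [hkA']
        refine List.Nodup.append hnd (List.nodup_singleton _) ?_
        intro a ha hb
        rw [List.mem_singleton] at hb
        exact hAm (hb ▸ ha)
      · rw [hkA', List.filter_append, PySem.Dict.keys_insert_of_not_contains dB _ hB', hkeys]
        simp [hse]
      · intro k hk
        rw [PySem.Dict.getD_modify, PySem.Dict.getD_insert]
        by_cases hks : k = sid
        · subst hks
          rw [if_pos rfl, if_pos rfl, PySem.Dict.getD_insert, if_pos rfl]
          simp [mval_single]
        · rw [if_neg hks, if_neg hks, PySem.Dict.getD_insert, if_neg hks]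
          exact hval k hk

-- the simulation holds after folding any list of events
theorem fold_inv (evs : List (List (String × Option String))) :
    ∀ (dA : PySem.Dict String (List (Option String))) (dB : PySem.Dict String (Option String)),
      dA.keys.Nodup →
      dB.keys = dA.keys.filter (fun k => !(k == "")) →
      (∀ k : String, k ≠ "" → dB.getD k none = mval (dA.getD k [])) →
      (evs.foldl sessionsA_step dA).keys.Nodup ∧
      (evs.foldl sessionsB_step dB).keys =
        (evs.foldl sessionsA_step dA).keys.filter (fun k => !(k == "")) ∧
      (∀ k : String, k ≠ "" →
        (evs.foldl sessionsB_step dB).getD k none =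
          mval ((evs.foldl sessionsA_step dA).getD k [])) := by
  induction evs with
  | nil => intro dA dB h1 h2 h3; exact ⟨h1, h2, h3⟩
  | cons ev rest ih =>
      intro dA dB h1 h2 h3
      obtain ⟨h1', h2', h3'⟩ := step_inv dA dB ev h1 h2 h3
      simpa using ih (sessionsA_step dA ev) (sessionsB_step dB ev) h1' h2' h3'

-- A's output loop is a filter-then-map over the dict's items
theorem foldl_skip {α β : Type} (p : α → Bool) (f : α → β) (l : List α) (acc : List β) :
    l.foldl (fun acc x => if p x then acc else acc ++ [f x]) acc =
      acc ++ (l.filter (fun x => !(p x))).map f := by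
  induction l generalizing acc with
  | nil => simp
  | cons x t ih =>
      simp only [List.foldl_cons, List.filter_cons]
      cases h : p x <;> simp [ih]

theorem started_eq_mval (l : List (Option String)) :
    (if l.filterMap (fun t => t) = [] then none
     else PySem.List.min? (l.filterMap (fun t => t)) (fun x => x)) = mval l := by
  unfold mval
  split
  · next h =>
      rw [h]
      exact ((PySem.List.min?_eq_none_iff [] _).2 rfl).symm
  · rfl

-- ===== VERDICT (by name: the statement is the Claim_ definition above) =====
theorem sessions_from_events_py_spec : Claim_equal_sessions_from_events_py := by
  intro evs _
  unfold Spec_sessions_from_events_py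
  simp only [sessions_from_events_py, sessions_from_events_py_alt]
  obtain ⟨hnd, hkeys, hval⟩ := fold_inv evs PySem.Dict.empty PySem.Dict.empty
    PySem.Dict.nodup_keys_empty (by simp [PySem.Dict.keys_empty])
    (fun k _ => by
      simp only [PySem.Dict.getD_empty, mval, List.filterMap_nil]
      exact ((PySem.List.min?_eq_none_iff [] _).2 rfl).symm)
  rw [foldl_skip]
  have hndB : (evs.foldl sessionsB_step PySem.Dict.empty).keys.Nodup := by
    rw [hkeys]; exact hnd.filter _
  rw [PySem.Dict.items_eq_map_keys _ hnd ([] : List (Option String)),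
    PySem.Dict.items_eq_map_keys _ hndB (none : Option String)]
  rw [List.filter_map, List.map_map, List.map_map, hkeys]
  simp only [List.nil_append]
  apply List.map_congr_left
  intro k hk
  have hkne : k ≠ "" := by
    have := (List.mem_filter.1 hk).2
    simpa using this
  simp only [Function.comp_apply, started_eq_mval, hval k hkne]
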